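-- pv_equiv track=rewrite | github.com/catman77/polymarket | scripts/research/generate_implementation_prd.py | extract_success_metrics
-- ===== SOURCE A (Python) =====
-- from typing import List, Dict, Any
--
-- def extract_success_metrics(milestone_content: List[str]) -> List[str]:
--     """Extract success metrics from milestone content."""
--     metrics = []
--     in_metrics = False
--
--     for line in milestone_content:
--         if '**Success Metrics:**' in line:
--             in_metrics = True
--             continue
--         if in_metrics:
--             if line.startswith('**'):
--                 in_metrics = False
--             elif line.strip().startswith('-'):
--                 metric = line.strip().lstrip('-').strip()
--                 if metric:
--                     metrics.append(metric)
--
--     return metrics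
-- ===== SOURCE B (Python) =====
-- def extract_success_metrics(milestone_content):
--     """Extract success metrics from milestone content (index-based section scan)."""
--     metrics = []
--     n = len(milestone_content)
--     i = 0
--     while i < n:
--         if '**Success Metrics:**' not in milestone_content[i]:
--             i += 1
--             continue
--         # header found: collect bullet lines of this section
--         i += 1
--         while i < n:
--             line = milestone_content[i]
--             if '**Success Metrics:**' in line:
--                 i += 1
--                 continue
--             if line.startswith('**'):
--                 break  # section ends; outer loop re-examines this line
--             stripped = line.strip()
--             if stripped.startswith('-'):
--                 metric = stripped.lstrip('-').strip()
--                 if metric: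
--                     metrics.append(metric)
--             i += 1
--     return metrics
-- ===== Notes on version B (the rewrite author's own statement) =====
-- stated objective: alternative
-- what changed: Replaces A's single pass with a persistent in_metrics boolean flag by an explicit two-level scan: an outer loop searches for a '**Success Metrics:**' header and an inner loop collects the section's bullet lines, handing a terminating '**' line back to the outer scan.
import Mathlib
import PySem

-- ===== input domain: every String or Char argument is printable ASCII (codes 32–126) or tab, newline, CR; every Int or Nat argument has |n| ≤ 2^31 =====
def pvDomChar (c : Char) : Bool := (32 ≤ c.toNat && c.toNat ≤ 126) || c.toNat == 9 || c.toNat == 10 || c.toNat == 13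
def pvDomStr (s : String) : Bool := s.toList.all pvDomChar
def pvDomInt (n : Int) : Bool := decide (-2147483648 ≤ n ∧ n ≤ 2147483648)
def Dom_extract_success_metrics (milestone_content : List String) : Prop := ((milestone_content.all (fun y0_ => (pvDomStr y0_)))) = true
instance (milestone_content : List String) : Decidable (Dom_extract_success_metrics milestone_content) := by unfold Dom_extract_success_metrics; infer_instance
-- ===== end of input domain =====

-- B replaces A's boolean in_metrics flag by an explicit two-level scan (outer header search,
-- inner bullet collection per section): same result, a different decomposition (objective: alternative).


-- s.lstrip('-') : drop the leading '-' characters; exact hand port of Python's str.lstrip('-')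
def lstripDash (s : String) : String := String.ofList (s.toList.dropWhile (· == '-'))

-- ===== PORT A =====
def extract_success_metrics (milestone_content : List String) : List String :=
  (milestone_content.foldl
    (fun (st : List String × Bool) line =>
      if PySem.Str.isIn "**Success Metrics:**" line then (st.1, true)
      else if st.2 then
        if PySem.Str.startswith line "**" then (st.1, false)
        else if PySem.Str.startswith (PySem.Str.strip line) "-" then
          let metric := PySem.Str.strip (lstripDash (PySem.Str.strip line))
          if metric ≠ "" then (st.1 ++ [metric], st.2) else st
        else st
      else st)
    ([], false)).1

-- ===== PORT B =====
mutual
-- outer loop of Source B: scan for a header line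
def altScan : List String → List String
  | [] => []
  | line :: rest =>
    if PySem.Str.isIn "**Success Metrics:**" line then altCollect rest
    else altScan rest
  termination_by xs => (xs.length, 0)
  decreasing_by all_goals simp [Prod.lex_def]
-- inner loop of Source B: collect bullets until a '**' line, which is handed back to the outer scan
def altCollect : List String → List String
  | [] => []
  | line :: rest =>
    if PySem.Str.isIn "**Success Metrics:**" line then altCollect rest
    else if PySem.Str.startswith line "**" then altScan (line :: rest)
    else
      let stripped := PySem.Str.strip line
      if PySem.Str.startswith stripped "-" then
        let metric := PySem.Str.strip (lstripDash stripped)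
        if metric ≠ "" then metric :: altCollect rest else altCollect rest
      else altCollect rest
  termination_by xs => (xs.length, 1)
  decreasing_by all_goals simp [Prod.lex_def]
end

def extract_success_metrics_alt (milestone_content : List String) : List String :=
  altScan milestone_content

-- ===== PRECONDITION & SPEC =====
def Spec_extract_success_metrics (milestone_content : List String) (out : List String) : Prop := out = extract_success_metrics_alt milestone_content
instance (milestone_content : List String) (out : List String) : Decidable (Spec_extract_success_metrics milestone_content out) := by unfold Spec_extract_success_metrics; infer_instance

-- ===== CLAIM (what is proved, stated in full; the proofs are below) =====
def Claim_equal_extract_success_metrics : Prop := ∀ (milestone_content : List String), Dom_extract_success_metrics milestone_content → Spec_extract_success_metrics milestone_content (extract_success_metrics milestone_content)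

-- ===== LEMMAS AND PROOFS =====

-- the foldl of A, named for the invariant
def aStep (st : List String × Bool) (line : String) : List String × Bool :=
  if PySem.Str.isIn "**Success Metrics:**" line then (st.1, true)
  else if st.2 then
    if PySem.Str.startswith line "**" then (st.1, false)
    else if PySem.Str.startswith (PySem.Str.strip line) "-" then
      let metric := PySem.Str.strip (lstripDash (PySem.Str.strip line))
      if metric ≠ "" then (st.1 ++ [metric], st.2) else st
    else st
  else st

lemma foldl_aStep_inv (mc : List String) : ∀ acc : List String,
    (mc.foldl aStep (acc, false)).1 = acc ++ altScan mc ∧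
    (mc.foldl aStep (acc, true)).1 = acc ++ altCollect mc := by
  induction mc with
  | nil => intro acc; simp [altScan, altCollect]
  | cons line rest ih =>
    intro acc
    by_cases hH : PySem.Str.isIn "**Success Metrics:**" line
    · simp at hH
      constructor
      · simp [aStep, altScan, hH, (ih acc).2]
      · simp [aStep, altCollect, hH, (ih acc).2]
    · by_cases hS : PySem.Str.startswith line "**"
      · simp at hH hS
        constructor
        · simp [aStep, altScan, hH, (ih acc).1]
        · simp [aStep, altCollect, altScan, hH, hS, (ih acc).1]
      · by_cases hD : PySem.Str.startswith (PySem.Str.strip line) "-"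
        · by_cases hM : PySem.Str.strip (lstripDash (PySem.Str.strip line)) = ""
          · simp at hH hS hD
            constructor
            · simp [aStep, altScan, hH, (ih acc).1]
            · simp [aStep, altCollect, hH, hS, hD, hM, (ih acc).2]
          · simp at hH hS hD
            constructor
            · simp [aStep, altScan, hH, (ih acc).1]
            · simp [aStep, altCollect, hH, hS, hD, hM,
                (ih (acc ++ [PySem.Str.strip (lstripDash (PySem.Str.strip line))])).2]
        · simp at hH hS hD
          constructor
          · simp [aStep, altScan, hH, (ih acc).1]
          · simp [aStep, altCollect, hH, hS, hD, (ih acc).2]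

-- ===== VERDICT (by name: the statement is the Claim_ definition above) =====
theorem extract_success_metrics_spec : Claim_equal_extract_success_metrics := by
  intro mc _
  show extract_success_metrics mc = extract_success_metrics_alt mc
  have h := (foldl_aStep_inv mc []).1
  simp only [List.nil_append] at h
  exact h
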